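-- pv_equiv track=rewrite | github.com/jds8/SAE4DLM-CE | dristifolder/dlm_order/plot.py | _title_case_words
-- ===== SOURCE A (Python) =====
-- def _title_case_words(s: str) -> str:
--     # Title Case with underscore removal; keep hyphenated tokens as-is except first char.
--     s = s.replace("_", " ").strip()
--     if not s:
--         return s
--     out = []
--     for tok in s.split():
--         if "-" in tok:
--             parts = tok.split("-")
--             parts = [p[:1].upper() + p[1:] if p else p for p in parts]
--             out.append("-".join(parts))
--         else:
--             out.append(tok[:1].upper() + tok[1:])
--     return " ".join(out)
-- ===== SOURCE B (Python) =====
-- def _title_case_words(s: str) -> str: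
--     # Normalize separators/whitespace first, then a single left-to-right scan
--     # that uppercases the character at each segment start (after ' ' or '-').
--     s = ' '.join(s.replace('_', ' ').strip().split())
--     out = []
--     start = True
--     for ch in s:
--         out.append(ch.upper() if start else ch)
--         start = ch in ' -'
--     return ''.join(out)
-- ===== Notes on version B (the rewrite author's own statement) =====
-- stated objective: alternative
-- what changed: A capitalizes via nested per-token loops (whitespace split, then an inner hyphen split/capitalize/rejoin); B normalizes once and then makes one linear scan with a boolean flag that uppercases each character standing right after a separator.
import Mathlib
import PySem

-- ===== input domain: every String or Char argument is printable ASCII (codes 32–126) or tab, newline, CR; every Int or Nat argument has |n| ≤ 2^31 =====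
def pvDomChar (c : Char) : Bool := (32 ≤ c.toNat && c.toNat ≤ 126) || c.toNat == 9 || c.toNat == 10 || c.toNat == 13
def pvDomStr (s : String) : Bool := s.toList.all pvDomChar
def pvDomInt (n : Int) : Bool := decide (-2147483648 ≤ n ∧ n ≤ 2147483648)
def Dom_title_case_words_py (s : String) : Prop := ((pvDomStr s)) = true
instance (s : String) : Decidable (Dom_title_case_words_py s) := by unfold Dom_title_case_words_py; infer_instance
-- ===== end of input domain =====

-- B replaces A's nested split/capitalize/join token loops by one normalization pass plus a
-- single linear scan that uppercases each character standing at a segment start (objective: alternative).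

-- ===== PORT A =====
-- per-token body of A's loop: hyphen tokens are split and each part capitalized, others capitalized directly
def pvCapA (tok : List Char) : List Char :=
  if PySem.Chars.isIn ['-'] tok then
    PySem.Chars.join ['-'] ((PySem.Chars.splitOn tok ['-']).map
      (fun p => if !p.isEmpty then
          PySem.Chars.upper (PySem.Chars.slice p none (some 1)) ++ PySem.Chars.slice p (some 1) none
        else p))
  else
    PySem.Chars.upper (PySem.Chars.slice tok none (some 1)) ++ PySem.Chars.slice tok (some 1) none

def title_case_words_py (s : String) : String :=
  let s1 := PySem.Chars.strip (PySem.Chars.replace s.toList ['_'] [' '])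
  if s1.isEmpty then String.mk s1
  else
    let out := (PySem.Chars.split₀ s1).foldl (fun out tok => out ++ [pvCapA tok]) []
    String.mk (PySem.Chars.join [' '] out)

-- ===== PORT B =====
-- 'ch in " -"' ported as the two-way character comparison (exact: membership of one char in the two-char string " -")
def pvScanStep (acc : List Char × Bool) (ch : Char) : List Char × Bool :=
  (acc.1 ++ [if acc.2 then PySem.Chars.upperChar ch else ch], (ch == ' ' || ch == '-'))

def title_case_words_py_alt (s : String) : String :=
  let t := PySem.Chars.join [' ']
    (PySem.Chars.split₀ (PySem.Chars.strip (PySem.Chars.replace s.toList ['_'] [' '])))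
  String.mk (t.foldl pvScanStep ([], true)).1

-- ===== PRECONDITION & SPEC =====
def Spec_title_case_words_py (s : String) (out : String) : Prop := out = title_case_words_py_alt s
instance (s : String) (out : String) : Decidable (Spec_title_case_words_py s out) := by unfold Spec_title_case_words_py; infer_instance

-- ===== CLAIM (what is proved, stated in full; the proofs are below) =====
def Claim_equal_title_case_words_py : Prop := ∀ (s : String), Dom_title_case_words_py s → Spec_title_case_words_py s (title_case_words_py s)

-- ===== LEMMAS AND PROOFS =====

-- B's scan, written as plain recursion (flag = "next char starts a segment")
def pvScan (f : Bool) : List Char → List Char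
  | [] => []
  | c :: r => (if f then PySem.Chars.upperChar c else c) :: pvScan (c == ' ' || c == '-') r

lemma pvFoldl_scan (l : List Char) (acc : List Char) (f : Bool) :
    (l.foldl pvScanStep (acc, f)).1 = acc ++ pvScan f l := by
  induction l generalizing acc f with
  | nil => simp [pvScan]
  | cons c r ih => simp [pvScanStep, pvScan, ih]

-- flag after scanning a block
def pvEnd (f : Bool) : List Char → Bool
  | [] => f
  | c :: r => pvEnd (c == ' ' || c == '-') r

lemma pvScan_append (f : Bool) (xs ys : List Char) :
    pvScan f (xs ++ ys) = pvScan f xs ++ pvScan (pvEnd f xs) ys := by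
  induction xs generalizing f with
  | nil => simp [pvScan, pvEnd]
  | cons c r ih => simp [pvScan, pvEnd, ih]

-- A's capitalize-first-nonempty, the shape the slices compute
def pvCap : List Char → List Char
  | [] => []
  | c :: r => PySem.Chars.upperChar c :: r

lemma pvCap_slices (p : List Char) :
    (if !p.isEmpty then
        PySem.Chars.upper (PySem.Chars.slice p none (some 1)) ++ PySem.Chars.slice p (some 1) none
      else p) = pvCap p := by
  cases p with
  | nil => simp [pvCap]
  | cons c r => simp [pvCap, PySem.Chars.upper, PySem.List.slice]

-- single-char split on '-', plain recursion
def pvHSplit : List Char → List (List Char)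
  | [] => [[]]
  | c :: r => if c = '-' then [] :: pvHSplit r else (pvHSplit r).modifyHead (c :: ·)

lemma pvModifyHead_fun_id {α : Type} (l : List α) : List.modifyHead (fun x => x) l = l := by
  cases l <;> rfl

lemma pvSplitOn_go_eq (l : List Char) (fuel : Nat) (cur : List Char) (acc : List (List Char))
    (h : l.length < fuel) :
    PySem.Chars.splitOn.go ['-'] fuel l cur acc
      = acc.reverse ++ (pvHSplit l).modifyHead (cur.reverse ++ ·) := by
  induction l generalizing fuel cur acc with
  | nil =>
    cases fuel with
    | zero => omega
    | succ n => simp [PySem.Chars.splitOn.go, pvHSplit]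
  | cons c r ih =>
    cases fuel with
    | zero => omega
    | succ n =>
      by_cases hc : c = '-'
      · subst hc
        rw [show PySem.Chars.splitOn.go ['-'] (n+1) ('-'::r) cur acc
              = PySem.Chars.splitOn.go ['-'] n r [] (cur.reverse :: acc) from by
            simp [PySem.Chars.splitOn.go]]
        rw [ih n [] (cur.reverse :: acc) (by simpa using h)]
        simp [pvHSplit, pvModifyHead_fun_id]
      · rw [show PySem.Chars.splitOn.go ['-'] (n+1) (c::r) cur acc
              = PySem.Chars.splitOn.go ['-'] n r (c :: cur) acc from by
            simp [PySem.Chars.splitOn.go, List.isPrefixOf, Ne.symm hc]]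
        rw [ih n (c :: cur) acc (by simpa using h)]
        cases hr : pvHSplit r <;> simp [pvHSplit, hc, hr]

lemma pvSplitOn_eq (l : List Char) : PySem.Chars.splitOn l ['-'] = pvHSplit l := by
  rw [PySem.Chars.splitOn, pvSplitOn_go_eq l (l.length + 1) [] [] (by omega)]
  cases h : pvHSplit l <;> simp

lemma pvHSplit_ne_nil (l : List Char) : pvHSplit l ≠ [] := by
  cases l with
  | nil => simp [pvHSplit]
  | cons c r =>
    by_cases hc : c = '-'
    · simp [pvHSplit, hc]
    · simp only [pvHSplit, if_neg hc]
      cases h : pvHSplit r with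
      | nil => exact absurd h (pvHSplit_ne_nil r)
      | cons a t => simp

lemma pvHSplit_no_dash (l : List Char) (h : ('-' : Char) ∉ l) : pvHSplit l = [l] := by
  induction l with
  | nil => rfl
  | cons c r ih =>
    simp only [List.mem_cons, not_or] at h
    have hc : c ≠ '-' := fun hce => h.1 hce.symm
    simp [pvHSplit, hc, ih h.2]

-- generic intercalate unfoldings (not found under these shapes in Mathlib by exact?)
lemma pvIntercalate_cons_cons {α : Type} (sep x y : List α) (l : List (List α)) :
    List.intercalate sep (x :: y :: l) = x ++ sep ++ List.intercalate sep (y :: l) := by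
  simp [List.intercalate]

lemma pvIntercalate_singleton {α : Type} (sep x : List α) :
    List.intercalate sep [x] = x := by
  simp [List.intercalate]

-- the heart: the scan over a space-free block equals '-'-split + capitalize + rejoin,
-- and with flag false the head part is left untouched
lemma pvScan_hsplit (l : List Char) (h : (' ' : Char) ∉ l) (hd : List Char) (t : List (List Char))
    (hs : pvHSplit l = hd :: t) :
    pvScan true l = List.intercalate ['-'] (pvCap hd :: t.map pvCap)
    ∧ pvScan false l = List.intercalate ['-'] (hd :: t.map pvCap) := by
  induction l generalizing hd t with
  | nil =>
    injection hs with h1 h2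
    simp [pvScan, ← h1, ← h2, pvCap, List.intercalate]
  | cons c r ih =>
    simp only [List.mem_cons, not_or] at h
    obtain ⟨hr, ht, hq⟩ : ∃ hr ht, pvHSplit r = hr :: ht := by
      cases hq : pvHSplit r with
      | nil => exact absurd hq (pvHSplit_ne_nil r)
      | cons a b => exact ⟨a, b, rfl⟩
    obtain ⟨ihT, ihF⟩ := ih h.2 hr ht hq
    by_cases hc : c = '-'
    · subst hc
      have hs2 : pvHSplit ('-' :: r) = [] :: hr :: ht := by simp [pvHSplit, hq]
      rw [hs2] at hs
      injection hs with h1 h2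
      subst h1; subst h2
      have hu : PySem.Chars.upperChar '-' = '-' := by decide
      refine ⟨?_, ?_⟩ <;>
        simp [pvScan, hu, ihT, pvCap, pvIntercalate_cons_cons]
    · have hs2 : pvHSplit (c :: r) = (c :: hr) :: ht := by simp [pvHSplit, hc, hq]
      rw [hs2] at hs
      injection hs with h1 h2
      subst h1; subst h2
      have hflag : (c == ' ' || c == '-') = false := by
        have : c ≠ ' ' := fun hce => h.1 hce.symm
        simp [this, hc]
      constructor
      · rw [show pvScan true (c :: r) = PySem.Chars.upperChar c :: pvScan (c == ' ' || c == '-') r from rfl,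
            hflag, ihF]
        cases ht <;> simp [pvCap, pvIntercalate_cons_cons, pvIntercalate_singleton]
      · rw [show pvScan false (c :: r) = c :: pvScan (c == ' ' || c == '-') r from rfl, hflag, ihF]
        cases ht <;> simp [pvIntercalate_cons_cons, pvIntercalate_singleton]

-- A's per-token work equals B's scan on one (space-free) token
lemma pvCapA_eq_scan (tok : List Char) (h : (' ' : Char) ∉ tok) :
    pvCapA tok = pvScan true tok := by
  obtain ⟨hd, t, hq⟩ : ∃ hd t, pvHSplit tok = hd :: t := by
    cases hq : pvHSplit tok with
    | nil => exact absurd hq (pvHSplit_ne_nil tok)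
    | cons a b => exact ⟨a, b, rfl⟩
  have hscan := (pvScan_hsplit tok h hd t hq).1
  unfold pvCapA
  by_cases hin : PySem.Chars.isIn ['-'] tok = true
  · rw [if_pos hin]
    simp only [pvCap_slices, pvSplitOn_eq, hq, PySem.Chars.join, hscan, List.map_cons]
  · rw [if_neg hin]
    have hd' : ('-' : Char) ∉ tok := by
      intro hmem
      exact hin ((PySem.Chars.isIn_iff_infix ['-'] tok).mpr ((List.singleton_infix_iff _ _).mpr hmem))
    rw [pvHSplit_no_dash tok hd'] at hq
    injection hq with h1 h2
    subst h1; subst h2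
    rw [hscan, List.map_nil, pvIntercalate_singleton]
    cases tok with
    | nil => simp [pvCap, PySem.Chars.upper, PySem.List.slice]
    | cons a b => simp [pvCap, PySem.Chars.upper, PySem.List.slice]

-- the scan distributes over the single-space join of space-free tokens
lemma pvScan_join (toks : List (List Char)) (h : ∀ tok ∈ toks, (' ' : Char) ∉ tok) :
    pvScan true (List.intercalate [' '] toks) = List.intercalate [' '] (toks.map pvCapA) := by
  induction toks with
  | nil => simp [pvScan, List.intercalate]
  | cons t rest ih =>
    have ht := h t (by simp)
    have hrest := fun tok hm => h tok (List.mem_cons_of_mem _ hm)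
    cases rest with
    | nil => simp [List.intercalate, pvCapA_eq_scan t ht]
    | cons t2 r2 =>
      rw [pvIntercalate_cons_cons, List.append_assoc, pvScan_append]
      have hu : PySem.Chars.upperChar ' ' = ' ' := by decide
      have hsp : ∀ (b : Bool), pvScan b ([' '] ++ List.intercalate [' '] (t2 :: r2)) =
          ' ' :: pvScan true (List.intercalate [' '] (t2 :: r2)) := by
        intro b; cases b <;> simp [pvScan, hu]
      rw [hsp, ih hrest]
      simp only [List.map_cons]
      rw [pvIntercalate_cons_cons, pvCapA_eq_scan t ht, List.append_assoc]
      rfl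

-- tokens produced by split₀ contain no space characters
lemma pvSplit₀_go_nospace (rest cur : List Char) (acc : List (List Char))
    (hacc : ∀ tok ∈ acc, (' ' : Char) ∉ tok) (hcur : (' ' : Char) ∉ cur) :
    ∀ tok ∈ PySem.Chars.split₀.go rest cur acc, (' ' : Char) ∉ tok := by
  induction rest generalizing cur acc with
  | nil =>
    intro tok hm
    simp only [PySem.Chars.split₀.go] at hm
    by_cases hc : cur.isEmpty
    · rw [if_pos hc] at hm
      simp only [List.mem_reverse] at hm
      exact hacc tok hm
    · rw [if_neg hc] at hm
      simp only [List.mem_reverse, List.mem_cons] at hm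
      rcases hm with h1 | h1
      · subst h1; simpa using hcur
      · exact hacc tok h1
  | cons c r ih =>
    by_cases hsp : PySem.Chars.isspace c = true
    · by_cases hc : cur.isEmpty
      · rw [show PySem.Chars.split₀.go (c :: r) cur acc = PySem.Chars.split₀.go r [] acc from by
          simp [PySem.Chars.split₀.go, hsp, hc]]
        exact ih [] acc hacc (by simp)
      · rw [show PySem.Chars.split₀.go (c :: r) cur acc
            = PySem.Chars.split₀.go r [] (cur.reverse :: acc) from by
          simp [PySem.Chars.split₀.go, hsp, hc]]
        refine ih [] (cur.reverse :: acc) ?_ (by simp)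
        intro tok hm
        rcases List.mem_cons.mp hm with h1 | h1
        · subst h1; simpa using hcur
        · exact hacc tok h1
    · rw [show PySem.Chars.split₀.go (c :: r) cur acc = PySem.Chars.split₀.go r (c :: cur) acc from by
        simp [PySem.Chars.split₀.go, hsp]]
      refine ih (c :: cur) acc hacc ?_
      have hcne : c ≠ ' ' := by
        intro hce; subst hce; exact hsp (by decide)
      simp [hcur, Ne.symm hcne]

-- ===== VERDICT (by name: the statement is the Claim_ definition above) =====
theorem title_case_words_py_spec : Claim_equal_title_case_words_py := by
  intro s _
  unfold Spec_title_case_words_py title_case_words_py title_case_words_py_alt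
  set w := PySem.Chars.strip (PySem.Chars.replace s.toList ['_'] [' ']) with hw
  by_cases he : w.isEmpty
  · rw [if_pos he]
    have : w = [] := by simpa using he
    rw [this]
    rfl
  · rw [if_neg he]
    dsimp only
    rw [show ∀ l : List Char, (l.foldl pvScanStep ([], true)).1 = pvScan true l from
      fun l => pvFoldl_scan l [] true]
    rw [PySem.List.foldl_append_singleton_eq_map]
    have hnos := pvSplit₀_go_nospace w [] [] (by simp) (by simp)
    rw [show PySem.Chars.split₀ w = PySem.Chars.split₀.go w [] [] from rfl] at *
    rw [show ∀ (sep : List Char) p, PySem.Chars.join sep p = List.intercalate sep p from fun _ _ => rfl,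
        show ∀ (sep : List Char) p, PySem.Chars.join sep p = List.intercalate sep p from fun _ _ => rfl]
    rw [List.nil_append, pvScan_join _ hnos]
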